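-- pv_equiv track=rewrite | github.com/dotsenkois/diploma-yandexcloud | 05.docker/salary_counter/calculator/calculate.py | calc_holidays_home
-- ===== SOURCE A (Python) =====
-- HOLIDAYS = {
--     'holidays': ['2021-01-01',
--                  '2021-01-02',
--                  '2021-01-03',
--                  '2021-01-04',
--                  '2021-01-05',
--                  '2021-01-06',
--                  '2021-01-07',
--                  '2021-01-08',
--                  '2021-02-23',
--                  '2021-03-08',
--                  '2021-05-01',
--                  '2021-05-09',
--                  '2021-06-12',
--                  '2021-11-04',
--                  '2021-12-31',
--                  '2022-01-01',
--                  '2022-01-02',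
--                  '2022-01-03',
--                  '2022-01-04',
--                  '2022-01-05',
--                  '2022-01-06',
--                  '2022-01-07',
--                  '2022-01-08',
--                  '2022-02-23',
--                  '2022-03-08',
--                  '2022-05-01',
--                  '2022-05-09',
--                  '2022-06-12',
--                  '2022-11-04',
--                  '2022-12-31']
-- }
--
-- def calc_holidays_home(all_days, days):
--     days_home = []
--     holidays_home = []
--     for day in all_days:
--         if day not in days:
--             days_home.append(day)
--
--     for holiday_l in HOLIDAYS.values():
--         for day in days_home:
--             if day in holiday_l:
--                 holidays_home.append(day)
--     return holidays_home
-- ===== SOURCE B (Python) =====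
-- HOLIDAYS = {
--     'holidays': ['2021-01-01',
--                  '2021-01-02',
--                  '2021-01-03',
--                  '2021-01-04',
--                  '2021-01-05',
--                  '2021-01-06',
--                  '2021-01-07',
--                  '2021-01-08',
--                  '2021-02-23',
--                  '2021-03-08',
--                  '2021-05-01',
--                  '2021-05-09',
--                  '2021-06-12',
--                  '2021-11-04',
--                  '2021-12-31',
--                  '2022-01-01',
--                  '2022-01-02',
--                  '2022-01-03',
--                  '2022-01-04',
--                  '2022-01-05',
--                  '2022-01-06',
--                  '2022-01-07',
--                  '2022-01-08',
--                  '2022-02-23',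
--                  '2022-03-08',
--                  '2022-05-01',
--                  '2022-05-09',
--                  '2022-06-12',
--                  '2022-11-04',
--                  '2022-12-31']
-- }
--
-- def calc_holidays_home(all_days, days):
--     holiday_set = set()
--     for holiday_l in HOLIDAYS.values():
--         holiday_set.update(holiday_l)
--     return [day for day in all_days if day not in days and day in holiday_set]
-- ===== Notes on version B (the rewrite author's own statement) =====
-- stated objective: simpler
-- what changed: B flattens HOLIDAYS.values() into one set once and replaces A's two-phase build (intermediate days_home list, then a nested scan over every holiday list) with a single fused pass over all_days filtering by set membership.
import Mathlib
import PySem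

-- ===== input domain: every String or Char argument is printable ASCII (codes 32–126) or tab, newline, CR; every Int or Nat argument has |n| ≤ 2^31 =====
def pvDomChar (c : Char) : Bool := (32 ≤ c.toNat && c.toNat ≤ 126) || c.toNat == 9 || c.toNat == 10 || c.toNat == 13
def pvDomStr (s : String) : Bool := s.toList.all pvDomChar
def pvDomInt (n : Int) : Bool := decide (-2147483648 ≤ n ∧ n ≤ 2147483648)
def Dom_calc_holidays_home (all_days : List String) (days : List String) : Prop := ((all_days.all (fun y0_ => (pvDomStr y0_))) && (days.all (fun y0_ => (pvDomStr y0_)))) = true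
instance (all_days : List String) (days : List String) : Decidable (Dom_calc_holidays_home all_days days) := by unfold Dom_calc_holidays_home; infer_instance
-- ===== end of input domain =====

-- B flattens HOLIDAYS.values() into one set built once and does a single fused pass over
-- all_days (no intermediate days_home list, no nested loop); objective: simpler.

-- the module constant HOLIDAYS = {'holidays': [...]}; its single value list:
def pvHolidayList : List String :=
  ["2021-01-01", "2021-01-02", "2021-01-03", "2021-01-04", "2021-01-05",
   "2021-01-06", "2021-01-07", "2021-01-08", "2021-02-23", "2021-03-08",
   "2021-05-01", "2021-05-09", "2021-06-12", "2021-11-04", "2021-12-31",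
   "2022-01-01", "2022-01-02", "2022-01-03", "2022-01-04", "2022-01-05",
   "2022-01-06", "2022-01-07", "2022-01-08", "2022-02-23", "2022-03-08",
   "2022-05-01", "2022-05-09", "2022-06-12", "2022-11-04", "2022-12-31"]

-- HOLIDAYS.values() as a list of value lists (the dict has one key)
def pvHolidaysValues : List (List String) := [pvHolidayList]

-- ===== PORT A =====
def calc_holidays_home (all_days : List String) (days : List String) : List String :=
  let days_home := all_days.foldl (fun acc day => if day ∉ days then acc ++ [day] else acc) []
  pvHolidaysValues.foldl
    (fun acc holiday_l =>
      days_home.foldl (fun acc day => if day ∈ holiday_l then acc ++ [day] else acc) acc)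
    []

-- ===== PORT B =====
def calc_holidays_home_alt (all_days : List String) (days : List String) : List String :=
  let holiday_set := pvHolidaysValues.foldl (fun s hl => PySem.Set.update s hl) PySem.Set.empty
  all_days.filter (fun day => decide (day ∉ days) && PySem.Set.contains holiday_set day)

-- ===== PRECONDITION & SPEC =====
def Spec_calc_holidays_home (all_days : List String) (days : List String) (out : List String) : Prop := out = calc_holidays_home_alt all_days days
instance (all_days : List String) (days : List String) (out : List String) : Decidable (Spec_calc_holidays_home all_days days out) := by unfold Spec_calc_holidays_home; infer_instance

-- ===== CLAIM (what is proved, stated in full; the proofs are below) =====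
def Claim_equal_calc_holidays_home : Prop := ∀ (all_days : List String) (days : List String), Dom_calc_holidays_home all_days days → Spec_calc_holidays_home all_days days (calc_holidays_home all_days days)

-- ===== LEMMAS AND PROOFS =====

-- the flattened set B builds is exactly the holiday list (which has no duplicates)
theorem pvSet_eq :
    pvHolidaysValues.foldl (fun s hl => PySem.Set.update s hl) PySem.Set.empty = pvHolidayList := by
  decide

-- ===== VERDICT (by name: the statement is the Claim_ definition above) =====
theorem calc_holidays_home_spec : Claim_equal_calc_holidays_home := by
  intro all_days days _
  show calc_holidays_home all_days days = calc_holidays_home_alt all_days days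
  unfold calc_holidays_home calc_holidays_home_alt
  rw [pvSet_eq]
  simp only [pvHolidaysValues, List.foldl_cons, List.foldl_nil,
    PySem.List.foldl_append_ite_eq_filter, List.nil_append, List.filter_filter]
  refine List.filter_congr (fun day _ => ?_)
  simp [PySem.Set.contains, Bool.and_comm]
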